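-- pv_equiv track=rewrite | github.com/shuque/compactdenial | compactdenial.py | nsec_type_set
-- ===== SOURCE A (Python) =====
-- def nsec_type_set(type_bitmaps):
--     """
--     Return set of RR types present in given NSEC record's type bitmaps.
--     """
--     type_set = set()
--     for (window, bitmap) in type_bitmaps:
--         for i, _ in enumerate(bitmap):
--             for j in range(0, 8):
--                 if bitmap[i] & (0x80 >> j):
--                     rrtype = window * 256 + i * 8 + j
--                     type_set.add(rrtype)
--     return type_set
-- ===== SOURCE B (Python) =====
-- def nsec_type_set(type_bitmaps):
--     """
--     Return set of RR types present in given NSEC record's type bitmaps.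
--
--     Instead of testing all 8 masks of every byte, walk only the set bits of
--     each byte (top-bit clearing via bit_length), converting each bit position
--     to its RR type number.
--     """
--     type_set = set()
--     for window, bitmap in type_bitmaps:
--         for i, byte in enumerate(bitmap):
--             base = window * 256 + i * 8
--             v = byte & 0xFF
--             while v:
--                 b = v.bit_length()
--                 v -= 1 << (b - 1)
--                 type_set.add(base + (8 - b))
--     return type_set
-- ===== Notes on version B (the rewrite author's own statement) =====
-- stated objective: alternative
-- what changed: The per-byte scan over all 8 masks (0x80>>j) is replaced by iterating only the set bits of each byte, clearing the top bit via bit_length until the byte is exhausted.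
import Mathlib
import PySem

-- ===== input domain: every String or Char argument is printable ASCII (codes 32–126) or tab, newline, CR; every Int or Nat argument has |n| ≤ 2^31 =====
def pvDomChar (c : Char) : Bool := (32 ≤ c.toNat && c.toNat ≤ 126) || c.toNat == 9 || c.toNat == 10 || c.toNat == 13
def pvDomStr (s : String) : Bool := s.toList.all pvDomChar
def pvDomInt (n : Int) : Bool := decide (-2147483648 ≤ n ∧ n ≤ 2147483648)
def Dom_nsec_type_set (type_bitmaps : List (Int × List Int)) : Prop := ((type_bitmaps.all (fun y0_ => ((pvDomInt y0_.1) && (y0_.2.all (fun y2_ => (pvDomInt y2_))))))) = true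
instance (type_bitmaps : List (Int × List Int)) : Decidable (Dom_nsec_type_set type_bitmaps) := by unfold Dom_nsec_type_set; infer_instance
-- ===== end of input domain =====

-- B walks only the set bits of each bitmap byte (clearing the top bit via bit_length)
-- instead of testing all 8 masks of every byte; same resulting set.

-- ===== PORT A =====
-- Literal port of A's three nested loops. bitmap[i] with i from enumerate is always
-- in range, so pyGetD is exact here; `0x80 >> j` has j ∈ range(0,8), j ≥ 0, so
-- `>>> j.toNat` is exact.
def nsec_type_set (type_bitmaps : List (Int × List Int)) : List Int :=
  type_bitmaps.foldl (fun type_set wb =>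
    (PySem.List.enumerate wb.2 0).foldl (fun type_set ie =>
      (PySem.List.pyRange 0 8 1).foldl (fun type_set j =>
        if PySem.Int.band (PySem.List.pyGetD wb.2 ie.1 0) ((128 : Int) >>> j.toNat) ≠ 0 then
          PySem.Set.add type_set (wb.1 * 256 + ie.1 * 8 + j)
        else type_set) type_set) type_set)
    PySem.Set.empty

-- ===== PORT B =====
-- Port of Source B's `while v:` loop. v = byte & 0xFF is a nonnegative int, represented
-- as Nat (exact); `v -= 1 << (b-1)` clears the top set bit, so v strictly decreases.
def pvBitLoop (base : Int) (type_set : PySem.Set Int) (v : Nat) : PySem.Set Int :=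
  if h : v = 0 then type_set
  else
    let b := PySem.Int.bitLength (v : Int)
    pvBitLoop base (PySem.Set.add type_set (base + (8 - (b : Int)))) (v - (1 <<< (b - 1)))
termination_by v
decreasing_by
  exact Nat.sub_lt (Nat.pos_of_ne_zero h) (by rw [Nat.shiftLeft_eq]; positivity)

def nsec_type_set_alt (type_bitmaps : List (Int × List Int)) : List Int :=
  type_bitmaps.foldl (fun type_set wb =>
    (PySem.List.enumerate wb.2 0).foldl (fun type_set ib =>
      pvBitLoop (wb.1 * 256 + ib.1 * 8) type_set (PySem.Int.band ib.2 255).toNat) type_set)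
    PySem.Set.empty

-- ===== PRECONDITION & SPEC =====
def Spec_nsec_type_set (type_bitmaps : List (Int × List Int)) (out : List Int) : Prop := out = nsec_type_set_alt type_bitmaps
instance (type_bitmaps : List (Int × List Int)) (out : List Int) : Decidable (Spec_nsec_type_set type_bitmaps out) := by unfold Spec_nsec_type_set; infer_instance

-- ===== CLAIM (what is proved, stated in full; the proofs are below) =====
def Claim_equal_nsec_type_set : Prop := ∀ (type_bitmaps : List (Int × List Int)), Dom_nsec_type_set type_bitmaps → Spec_nsec_type_set type_bitmaps (nsec_type_set type_bitmaps)

-- ===== LEMMAS AND PROOFS =====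

-- A's per-byte inner loop, re-expressed: fold with a guard = fold over the filtered list.
theorem pvFoldlFilter {α β : Type} (p : α → Prop) [DecidablePred p] (f : β → α → β) :
    ∀ (l : List α) (init : β),
      l.foldl (fun acc x => if p x then f acc x else acc) init
        = (l.filter (fun x => decide (p x))).foldl f init := by
  intro l
  induction l with
  | nil => intro init; rfl
  | cons x xs ih =>
      intro init
      by_cases hx : p x <;> simp [hx, ih]

-- the ascending positions j of the set bits of v, as A's filtered scan computes them
def pvJListA (v : Nat) : List Int :=
  (PySem.List.pyRange 0 8 1).filter (fun j => decide (v &&& ((128 : Nat) >>> j.toNat) ≠ 0))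

-- the same positions as B's top-bit-clearing loop emits them
def pvJListB (v : Nat) : List Int :=
  if h : v = 0 then []
  else
    (8 - (PySem.Int.bitLength (v : Int) : Int))
      :: pvJListB (v - (1 <<< (PySem.Int.bitLength (v : Int) - 1)))
termination_by v
decreasing_by
  exact Nat.sub_lt (Nat.pos_of_ne_zero h) (by rw [Nat.shiftLeft_eq]; positivity)

set_option maxRecDepth 8192 in
theorem pvJListA_step : ∀ v < 256, v ≠ 0 →
    pvJListA v = (8 - (PySem.Int.bitLength (v : Int) : Int))
      :: pvJListA (v - (1 <<< (PySem.Int.bitLength (v : Int) - 1))) := by decide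

theorem pvJList_eq : ∀ v < 256, pvJListA v = pvJListB v := by
  intro v
  induction v using Nat.strong_induction_on with
  | _ v ih =>
      intro h256
      rw [pvJListB.eq_def]
      by_cases hz : v = 0
      · subst hz; decide
      · simp only [hz, dite_false]
        rw [pvJListA_step v h256 hz]
        congr 1
        have hlt : v - (1 <<< (PySem.Int.bitLength (v : Int) - 1)) < v :=
          Nat.sub_lt (Nat.pos_of_ne_zero hz) (by rw [Nat.shiftLeft_eq]; positivity)
        exact ih _ hlt (by omega)

theorem pvBitLoop_eq_foldl :
    ∀ (v : Nat) (base : Int) (ts : PySem.Set Int),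
      pvBitLoop base ts v = (pvJListB v).foldl (fun ts j => PySem.Set.add ts (base + j)) ts := by
  intro v
  induction v using Nat.strong_induction_on with
  | _ v ih =>
      intro base ts
      rw [pvBitLoop.eq_def, pvJListB.eq_def]
      by_cases h : v = 0
      · simp [h]
      · simp only [h, dite_false]
        rw [ih _ (Nat.sub_lt (Nat.pos_of_ne_zero h) (by rw [Nat.shiftLeft_eq]; positivity))]
        rfl

set_option maxRecDepth 8192 in
theorem pvSubTestBit : ∀ r < 256, ∀ k < 8, (255 - r).testBit k = !r.testBit k := by decide

theorem pvBandLt (byte : Int) : (PySem.Int.band byte 255).toNat < 256 := by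
  rw [PySem.Int.band.eq_1]
  by_cases h : (0 : Int) ≤ byte <;> simp [h]
  · have h1 : byte.toNat &&& 255 ≤ 255 := Nat.and_le_right
    omega
  · omega

theorem pvBandPowIff (byte : Int) (k : Nat) (hk : k < 8) :
    (PySem.Int.band byte (((2 ^ k : Nat) : Int)) ≠ 0)
      ↔ ((PySem.Int.band byte 255).toNat &&& 2 ^ k ≠ 0) := by
  have h2 : (0 : Int) ≤ ((2 ^ k : Nat) : Int) := by positivity
  have hand : ∀ n : Nat, (n &&& 2 ^ k ≠ 0) ↔ n.testBit k = true := by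
    intro n
    rw [Nat.and_two_pow]
    cases hn : n.testBit k <;> simp [hn]
  by_cases hb : (0 : Int) ≤ byte
  · rw [PySem.Int.band_of_nonneg hb h2, PySem.Int.band_of_nonneg hb (by norm_num)]
    have ht : ((2 ^ k : Nat) : Int).toNat = 2 ^ k := Int.toNat_natCast _
    rw [ht]
    simp only [Int.toNat_natCast, ne_eq, Int.natCast_eq_zero]
    rw [show ((255 : Int).toNat) = 255 from rfl]
    constructor
    · intro h
      have h1 := (hand _).mp h
      refine (hand _).mpr ?_
      rw [Nat.testBit_and]
      have h255 : (255 : Nat).testBit k = true := by interval_cases k <;> decide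
      simp [h1, h255]
    · intro h
      have h1 := (hand _).mp h
      rw [Nat.testBit_and, Bool.and_eq_true] at h1
      exact (hand _).mpr h1.1
  · have hb' : ¬ (0 : Int) ≤ byte := hb
    rw [PySem.Int.band.eq_1, PySem.Int.band.eq_1]
    simp only [hb', if_false, h2, if_true, show ((0:Int) ≤ 255) from by norm_num]
    set c : Nat := (-byte - 1).toNat with hc
    have ht : ((2 ^ k : Nat) : Int).toNat = 2 ^ k := Int.toNat_natCast _
    rw [ht]
    have hmask : 2 ^ k &&& c = (c.testBit k).toNat * 2 ^ k := by
      rw [Nat.and_comm, Nat.and_two_pow]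
    have h255c : (255 : Int).toNat &&& c = c % 256 := by
      rw [show ((255 : Int).toNat) = 255 from rfl, Nat.and_comm]
      exact Nat.and_two_pow_sub_one_eq_mod c 8
    rw [hmask, h255c]
    simp only [show Int.toNat 255 = 255 from rfl]
    have hv : (255 - c % 256).testBit k = !(c.testBit k) := by
      rw [pvSubTestBit (c % 256) (Nat.mod_lt _ (by norm_num)) k hk]
      congr 1
      rw [show (256 : Nat) = 2 ^ 8 by norm_num, Nat.testBit_mod_two_pow]
      simp [hk]
    rw [hand, Int.toNat_natCast, hv]
    cases hcb : c.testBit k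
    · simp only [hcb, Bool.toNat_false, Nat.zero_mul, zero_mul, Nat.sub_zero, Bool.not_false]
      simp [pow_ne_zero]
    · simp only [hcb, Bool.toNat_true, one_mul, Nat.sub_self, Bool.not_true]
      simp

theorem pvTestEq (byte : Int) (j : Int) (hj : j ∈ PySem.List.pyRange 0 8 1) :
    (PySem.Int.band byte ((128 : Int) >>> j.toNat) ≠ 0)
      ↔ ((PySem.Int.band byte 255).toNat &&& ((128 : Nat) >>> j.toNat) ≠ 0) := by
  have hj' : j = 0 ∨ j = 1 ∨ j = 2 ∨ j = 3 ∨ j = 4 ∨ j = 5 ∨ j = 6 ∨ j = 7 := by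
    have h := PySem.List.mem_pyRange_one.mp hj; omega
  rcases hj' with h | h | h | h | h | h | h | h <;> subst h <;>
    [ exact pvBandPowIff byte 7 (by norm_num);
      exact pvBandPowIff byte 6 (by norm_num);
      exact pvBandPowIff byte 5 (by norm_num);
      exact pvBandPowIff byte 4 (by norm_num);
      exact pvBandPowIff byte 3 (by norm_num);
      exact pvBandPowIff byte 2 (by norm_num);
      exact pvBandPowIff byte 1 (by norm_num);
      exact pvBandPowIff byte 0 (by norm_num) ]

theorem pvInnerEq (byte w idx : Int) (ts : PySem.Set Int) :
    (PySem.List.pyRange 0 8 1).foldl (fun ts j =>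
        if PySem.Int.band byte ((128 : Int) >>> j.toNat) ≠ 0 then
          PySem.Set.add ts (w * 256 + idx * 8 + j)
        else ts) ts
      = pvBitLoop (w * 256 + idx * 8) ts (PySem.Int.band byte 255).toNat := by
  refine Eq.trans (pvFoldlFilter (fun j : Int => PySem.Int.band byte ((128 : Int) >>> j.toNat) ≠ 0)
      (fun ts j => PySem.Set.add ts (w * 256 + idx * 8 + j)) (PySem.List.pyRange 0 8 1) ts) ?_
  rw [pvBitLoop_eq_foldl, ← pvJList_eq _ (pvBandLt byte)]
  unfold pvJListA
  congr 1
  exact List.filter_congr (fun j hj => by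
    rw [decide_eq_decide]
    exact pvTestEq byte j hj)

theorem nsec_type_set_spec : Claim_equal_nsec_type_set := by
  intro tb _
  unfold Spec_nsec_type_set nsec_type_set nsec_type_set_alt
  apply PySem.List.foldl_congr_mem
  intro ts wb _
  apply PySem.List.foldl_congr_mem
  intro ts ie hie
  rcases (PySem.List.mem_enumerate_iff wb.2 0 ie).mp hie with ⟨k, hk, rfl⟩
  simp only [zero_add]
  have hget : PySem.List.pyGetD wb.2 ((k : Int)) 0 = wb.2[k] := by
    rw [PySem.List.pyGetD_natCast]
    exact List.getD_eq_getElem wb.2 0 hk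
  rw [hget]
  exact pvInnerEq wb.2[k] wb.1 (k : Int) ts
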